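-- pv_equiv track=rewrite | github.com/SnowIsWhite/clothing-analysis | clothing-names/product/fetch_product.py | __getAttributeIndicies__
-- ===== SOURCE A (Python) =====
-- def __getAttributeIndicies__(attr, colors):
--     attrIndicies = {}
--     attrs = [el for key in attr for el in attr[key]]
--     attrs += [col for col in colors]
--     cnt = 0
--     for el in attrs:
--         if el not in attrIndicies:
--             attrIndicies[el] = cnt
--             cnt += 1
--     return attrIndicies
-- ===== SOURCE B (Python) =====
-- def __getAttributeIndicies__(attr, colors):
--     xs = [el for key in attr for el in attr[key]] + list(colors)
--     res = {}
--     i = 0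
--     while xs:
--         head = xs[0]
--         res[head] = i
--         i += 1
--         xs = [x for x in xs[1:] if x != head]
--     return res
-- ===== Notes on version B (the rewrite author's own statement) =====
-- stated objective: alternative
-- what changed: Replaces A's single counter-maintaining dict-membership loop by staged filtering passes: repeatedly assign the next index to the current head and filter every remaining copy of it out of the worklist, so no membership test or counter dict is ever consulted.
import Mathlib
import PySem

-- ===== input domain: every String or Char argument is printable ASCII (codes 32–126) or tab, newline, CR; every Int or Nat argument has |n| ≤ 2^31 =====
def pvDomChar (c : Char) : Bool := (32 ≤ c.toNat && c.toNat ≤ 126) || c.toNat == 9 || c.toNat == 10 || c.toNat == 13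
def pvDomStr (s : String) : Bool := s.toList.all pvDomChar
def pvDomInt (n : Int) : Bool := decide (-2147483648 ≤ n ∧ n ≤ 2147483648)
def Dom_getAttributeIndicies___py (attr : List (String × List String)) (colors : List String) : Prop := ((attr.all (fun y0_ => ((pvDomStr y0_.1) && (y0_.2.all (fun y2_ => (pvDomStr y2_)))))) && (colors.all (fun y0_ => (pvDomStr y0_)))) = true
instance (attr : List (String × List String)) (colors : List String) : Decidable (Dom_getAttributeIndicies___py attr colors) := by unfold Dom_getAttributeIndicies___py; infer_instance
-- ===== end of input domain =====

-- B replaces A's counter-maintaining membership loop by staged filtering passes: assign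
-- the next index to the head, filter its copies out (alternative; neither mutates its arguments).

-- ===== PORT A =====
-- attrIndicies is built by a fold over the flattened attr values plus colors, carrying (dict, cnt).
def getAttributeIndicies___py (attr : List (String × List String)) (colors : List String) : List (String × Int) :=
  let d := PySem.Dict.ofList attr
  let attrs := d.keys.flatMap (fun key => d.getD key [])
  let attrs := attrs ++ colors.map (fun col => col)
  let st := attrs.foldl
    (fun (st : PySem.Dict String Int × Int) el =>
      if st.1.contains el then st else (st.1.insert el st.2, st.2 + 1))
    (PySem.Dict.empty, 0)
  st.1.items

-- ===== PORT B =====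
-- B's while loop: assign the next index i to the head, filter all its copies out of the worklist.
def pvAssignLoop : List String → Int → List (String × Int) → List (String × Int)
  | [], _, res => res
  | x :: xs, i, res => pvAssignLoop (xs.filter (fun y => y ≠ x)) (i + 1) (res ++ [(x, i)])
termination_by xs => xs.length
decreasing_by
  refine Nat.lt_succ_of_le ?_
  simpa using (List.length_filter_le _ xs.attach).trans (le_of_eq (by simp))

def getAttributeIndicies___py_alt (attr : List (String × List String)) (colors : List String) : List (String × Int) :=
  pvAssignLoop ((PySem.Dict.ofList attr).keys.flatMap
      (fun key => (PySem.Dict.ofList attr).getD key []) ++ colors) 0 []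

-- ===== PRECONDITION & SPEC =====
def Spec_getAttributeIndicies___py (attr : List (String × List String)) (colors : List String) (out : List (String × Int)) : Prop := out = getAttributeIndicies___py_alt attr colors
instance (attr : List (String × List String)) (colors : List String) (out : List (String × Int)) : Decidable (Spec_getAttributeIndicies___py attr colors out) := by unfold Spec_getAttributeIndicies___py; infer_instance

-- ===== CLAIM (what is proved, stated in full; the proofs are below) =====
def Claim_equal_getAttributeIndicies___py : Prop := ∀ (attr : List (String × List String)) (colors : List String), Dom_getAttributeIndicies___py attr colors → Spec_getAttributeIndicies___py attr colors (getAttributeIndicies___py attr colors)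

-- ===== LEMMAS AND PROOFS =====

-- the dict A has built after indexing the distinct elements `acc` (in order)
def pvIdxDict (acc : List String) : PySem.Dict String Int :=
  PySem.Dict.mk ((PySem.List.enumerate acc).map (fun p => (p.2, p.1)))

theorem pvIdxDict_keys (acc : List String) : (pvIdxDict acc).keys = acc := by
  simp [pvIdxDict, PySem.Dict.keys, Function.comp_def, PySem.List.map_snd_enumerate]

theorem pvIdxDict_contains (acc : List String) (x : String) :
    (pvIdxDict acc).contains x = decide (x ∈ acc) := by
  rw [PySem.Dict.contains_eq_decide_mem_keys, pvIdxDict_keys]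

theorem pvIdxDict_snoc (acc : List String) (x : String) (hx : x ∉ acc) :
    (pvIdxDict acc).insert x (acc.length : Int) = pvIdxDict (acc ++ [x]) := by
  apply PySem.Dict.ext
  rw [PySem.Dict.items_insert_of_not_contains]
  · simp [pvIdxDict, PySem.List.enumerate_append,
      PySem.List.enumerate_cons, PySem.List.enumerate_nil]
  · rw [pvIdxDict_contains]; simpa using hx

-- A's loop invariant: starting from the dict for `acc`, the fold ends at the dict for Set.update acc xs
theorem pvLoop (xs acc : List String) :
    xs.foldl
      (fun (st : PySem.Dict String Int × Int) el =>
        if st.1.contains el then st else (st.1.insert el st.2, st.2 + 1))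
      (pvIdxDict acc, (acc.length : Int))
    = (pvIdxDict (PySem.Set.update acc xs), ((PySem.Set.update acc xs).length : Int)) := by
  induction xs generalizing acc with
  | nil => simp [PySem.Set.update]
  | cons x xs ih =>
    simp only [List.foldl_cons, pvIdxDict_contains]
    by_cases hx : x ∈ acc
    · rw [if_pos (by simpa using hx)]
      have hupd : PySem.Set.update acc (x :: xs) = PySem.Set.update acc xs := by
        simp [PySem.Set.update, PySem.Set.add, PySem.Set.contains, hx]
      rw [hupd]; exact ih acc
    · rw [if_neg (by simpa using hx), pvIdxDict_snoc acc x hx,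
          show ((acc.length : Int) + 1) = (((acc ++ [x]).length : Int)) by simp,
          ih (acc ++ [x])]
      have hupd : PySem.Set.update acc (x :: xs) = PySem.Set.update (acc ++ [x]) xs := by
        simp [PySem.Set.update, PySem.Set.add, PySem.Set.contains, hx]
      rw [hupd]

-- filtering out an element already recorded in acc does not change Set.update
theorem pvUpdate_filter (xs : List String) (acc : List String) (x : String) (hx : x ∈ acc) :
    PySem.Set.update acc (xs.filter (fun y => y ≠ x)) = PySem.Set.update acc xs := by
  induction xs generalizing acc with
  | nil => rfl
  | cons y xs ih =>
    by_cases hy : y = x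
    · subst hy
      have hadd : PySem.Set.add acc y = acc := by
        simp [PySem.Set.add, PySem.Set.contains, hx]
      rw [List.filter_cons_of_neg (by simp)]
      show PySem.Set.update acc (xs.filter (fun z => z ≠ y))
          = PySem.Set.update (PySem.Set.add acc y) xs
      rw [hadd]; exact ih acc hx
    · simp only [List.filter_cons, decide_eq_true_eq]
      rw [if_pos (by simpa using hy)]
      show PySem.Set.update (PySem.Set.add acc y) _ = PySem.Set.update (PySem.Set.add acc y) _
      exact ih (PySem.Set.add acc y) (by
        by_cases h : y ∈ acc <;> simp [PySem.Set.add, PySem.Set.contains, h, hx])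

-- an element absent from xs can be peeled off the front of the accumulator
theorem pvUpdate_cons_acc (xs : List String) (acc : List String) (x : String) (hx : x ∉ xs) :
    PySem.Set.update (x :: acc) xs = x :: PySem.Set.update acc xs := by
  induction xs generalizing acc with
  | nil => rfl
  | cons y xs ih =>
    have hyx : y ≠ x := fun h => hx (h ▸ List.mem_cons_self)
    have hx' : x ∉ xs := fun h => hx (List.mem_cons_of_mem _ h)
    show PySem.Set.update (PySem.Set.add (x :: acc) y) xs
        = x :: PySem.Set.update (PySem.Set.add acc y) xs
    by_cases hy : y ∈ acc
    · have h1 : PySem.Set.add (x :: acc) y = x :: acc := by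
        simp [PySem.Set.add, PySem.Set.contains, hy]
      have h2 : PySem.Set.add acc y = acc := by
        simp [PySem.Set.add, PySem.Set.contains, hy]
      rw [h1, h2]; exact ih acc hx'
    · have h1 : PySem.Set.add (x :: acc) y = x :: (acc ++ [y]) := by
        simp [PySem.Set.add, PySem.Set.contains, hy, hyx]
      have h2 : PySem.Set.add acc y = acc ++ [y] := by
        simp [PySem.Set.add, PySem.Set.contains, hy]
      rw [h1, h2]; exact ih (acc ++ [y]) hx'

-- B's loop computes exactly the enumerated first-occurrence dedup of its worklist
theorem pvAssignLoop_eq (xs : List String) (i : Int) (res : List (String × Int)) :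
    pvAssignLoop xs i res
      = res ++ (PySem.List.enumerate (PySem.Set.update [] xs) i).map (fun p => (p.2, p.1)) := by
  induction hn : xs.length using Nat.strong_induction_on generalizing xs i res with
  | _ n ih =>
    match xs with
    | [] => simp [pvAssignLoop.eq_def, PySem.Set.update, PySem.List.enumerate_nil]
    | x :: xs =>
      have hlen : (xs.filter (fun y => y ≠ x)).length < n := by
        subst hn; exact Nat.lt_succ_of_le (List.length_filter_le _ _)
      have hd : PySem.Set.update [] (x :: xs)
          = x :: PySem.Set.update [] (xs.filter (fun y => y ≠ x)) := by
        have h0 : PySem.Set.update ([] : List String) (x :: xs)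
            = PySem.Set.update [x] xs := by
          simp [PySem.Set.update, PySem.Set.add, PySem.Set.contains]
        rw [h0, ← pvUpdate_filter xs [x] x (by simp)]
        exact pvUpdate_cons_acc _ [] x (by simp)
      rw [pvAssignLoop.eq_def]
      simp only []
      rw [ih _ hlen _ (i + 1) _ rfl, hd, PySem.List.enumerate_cons]
      simp

-- ===== VERDICT (by name: the statement is the Claim_ definition above) =====
theorem getAttributeIndicies___py_spec : Claim_equal_getAttributeIndicies___py := by
  intro attr colors _
  unfold Spec_getAttributeIndicies___py getAttributeIndicies___py getAttributeIndicies___py_alt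
  simp only [List.map_id']
  rw [show (PySem.Dict.empty : PySem.Dict String Int) = pvIdxDict [] from rfl,
      show (0 : Int) = (([] : List String).length : Int) from rfl, pvLoop, pvAssignLoop_eq]
  rfl
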